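-- pv_equiv track=rewrite | github.com/jgam/hackerrank | kakao/cache.py | get_cache
-- ===== SOURCE A (Python) =====
-- def get_cache(size, array):
-- 	#input is the array
-- 	ret_num = 0
-- 	array = [i.upper() for i in array]
-- 	for index in range(size, len(array)):
-- 		#do some
-- 		if array[index] in array[index-size:index]:
-- 			ret_num += 1
-- 		else:
-- 			ret_num += 5
-- 	return ret_num + (5*size)
-- ===== SOURCE B (Python) =====
-- def get_cache(size, array):
--     arr = [s.upper() for s in array]
--     counts = {}
--     for x in arr[:size]:
--         counts[x] = counts.get(x, 0) + 1
--     score = 0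
--     for i in range(size, len(arr)):
--         x = arr[i]
--         score += 1 if counts.get(x, 0) > 0 else 5
--         counts[x] = counts.get(x, 0) + 1
--         old = arr[i - size]
--         counts[old] = counts.get(old, 0) - 1
--     return score + 5 * size
-- ===== Notes on version B (the rewrite author's own statement) =====
-- stated objective: faster
-- what changed: Replaces the per-index membership rescan of the size-wide window slice by a single pass that maintains a sliding-window element-count dict, testing membership as count>0 and updating counts incrementally.
-- outside the precondition, e.g. on get_cache(-1, ['a', 'b']): A returns 10, B raises IndexError
import Mathlib
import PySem

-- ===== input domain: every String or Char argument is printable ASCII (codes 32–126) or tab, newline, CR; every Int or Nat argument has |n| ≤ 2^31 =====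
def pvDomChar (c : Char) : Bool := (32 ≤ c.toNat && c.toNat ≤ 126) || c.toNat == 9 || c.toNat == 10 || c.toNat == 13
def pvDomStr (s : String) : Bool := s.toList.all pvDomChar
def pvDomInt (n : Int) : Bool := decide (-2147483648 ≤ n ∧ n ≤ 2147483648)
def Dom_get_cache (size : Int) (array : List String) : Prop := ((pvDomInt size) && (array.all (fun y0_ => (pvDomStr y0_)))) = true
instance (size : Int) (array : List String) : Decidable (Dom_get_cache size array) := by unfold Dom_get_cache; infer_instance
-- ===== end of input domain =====

-- B replaces A's per-index rescan of the size-wide window by a sliding-window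
-- count dictionary updated incrementally (objective: faster, asymptotic).


-- ===== PORT A =====
def get_cache (size : Int) (array : List String) : Int :=
  let arr := array.map PySem.Str.upper
  let ret_num :=
    (PySem.List.pyRange size (arr.length : Int) 1).foldl
      (fun r index =>
        if PySem.List.pyGetD arr index "" ∈
            PySem.List.slice arr (some (index - size)) (some index)
        then r + 1 else r + 5) 0
  ret_num + 5 * size

-- ===== PORT B =====
def get_cache_alt (size : Int) (array : List String) : Int :=
  let arr := array.map PySem.Str.upper
  let counts0 : PySem.Dict String Int :=
    (PySem.List.slice arr none (some size)).foldl
      (fun d x => d.insert x (d.getD x 0 + 1)) PySem.Dict.empty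
  let res :=
    (PySem.List.pyRange size (arr.length : Int) 1).foldl
      (fun (st : PySem.Dict String Int × Int) i =>
        let x := PySem.List.pyGetD arr i ""
        let score := st.2 + (if st.1.getD x 0 > 0 then 1 else 5)
        let d1 := st.1.insert x (st.1.getD x 0 + 1)
        let old := PySem.List.pyGetD arr (i - size) ""
        (d1.insert old (d1.getD old 0 - 1), score))
      (counts0, 0)
  res.2 + 5 * size

-- ===== PRECONDITION & SPEC =====
-- Pre_ excludes negative size, on which A's window indices go negative and its value
-- rests on Python's accidental negative-index wraparound; B's algorithm raises there.
def Pre_get_cache (size : Int) (_array : List String) : Prop := 0 ≤ size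
instance (size : Int) (array : List String) : Decidable (Pre_get_cache size array) := by unfold Pre_get_cache; infer_instance
def pvWitness_get_cache : Int × List String := (2, ["a", "b", "A", "c", "b"])
def Spec_get_cache (size : Int) (array : List String) (out : Int) : Prop := out = get_cache_alt size array
instance (size : Int) (array : List String) (out : Int) : Decidable (Spec_get_cache size array out) := by unfold Spec_get_cache; infer_instance

-- ===== CLAIM (what is proved, stated in full; the proofs are below) =====
def Claim_equal_get_cache : Prop := ∀ (size : Int) (array : List String), Dom_get_cache size array → Pre_get_cache size array → Spec_get_cache size array (get_cache size array)

-- ===== LEMMAS AND PROOFS =====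

-- count of the window slid one step right: gains arr[a+K], loses arr[a]
lemma pv_count_shift (arr : List String) (K a : Nat) (h : a + K < arr.length) (y : String) :
    (((arr.drop (a+1)).take K).count y : Int)
      = (((arr.drop a).take K).count y : Int)
        + (if y = arr[a+K]'h then 1 else 0)
        - (if y = arr[a]'(by omega) then 1 else 0) := by
  have h1 : (arr.drop a).take (K+1) = arr[a]'(by omega) :: (arr.drop (a+1)).take K := by
    rw [List.drop_eq_getElem_cons (by omega), List.take_succ_cons]
  have h2 : (arr.drop a).take (K+1) = (arr.drop a).take K ++ [arr[a+K]'h] := by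
    rw [List.take_add_one]
    have : (arr.drop a)[K]? = some (arr[a+K]'h) := by
      rw [List.getElem?_drop]
      exact List.getElem?_eq_getElem h
    rw [this]
    rfl
  have hc := congrArg (List.count y) (h1.symm.trans h2)
  simp only [List.count_cons, List.count_append, beq_iff_eq] at hc
  by_cases hx : y = arr[a+K]'h <;> by_cases ho : y = arr[a]'(by omega)
  · simp [← hx, ← ho] at hc ⊢; omega
  · simp [← hx, ho, Ne.symm ho] at hc ⊢; omega
  · simp [← ho, hx, Ne.symm hx] at hc ⊢; omega
  · simp [hx, ho, Ne.symm hx, Ne.symm ho] at hc ⊢; omega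

lemma pv_loop (arr : List String) (k : Int) (hk : 0 ≤ k) (m : Nat) :
    ∀ (i : Int), k ≤ i → (arr.length : Int) ≤ i + m →
    ∀ (d : PySem.Dict String Int) (s : Int),
    (∀ y, d.getD y 0 = (((arr.drop (i - k).toNat).take k.toNat).count y : Int)) →
    ((PySem.List.pyRange i (arr.length : Int) 1).foldl
        (fun (st : PySem.Dict String Int × Int) i =>
          let x := PySem.List.pyGetD arr i ""
          let score := st.2 + (if st.1.getD x 0 > 0 then 1 else 5)
          let d1 := st.1.insert x (st.1.getD x 0 + 1)
          let old := PySem.List.pyGetD arr (i - k) ""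
          (d1.insert old (d1.getD old 0 - 1), score))
        (d, s)).2
      = (PySem.List.pyRange i (arr.length : Int) 1).foldl
          (fun r index =>
            if PySem.List.pyGetD arr index "" ∈
                PySem.List.slice arr (some (index - k)) (some index)
            then r + 1 else r + 5) s := by
  induction m with
  | zero =>
    intro i hki hlen d s hinv
    rw [PySem.List.pyRange_one_eq_nil (by omega)]
    rfl
  | succ m ih =>
    intro i hki hlen d s hinv
    by_cases hil : (arr.length : Int) ≤ i
    · rw [PySem.List.pyRange_one_eq_nil hil]
      rfl
    · rw [not_le] at hil
      rw [PySem.List.pyRange_one_cons hil]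
      simp only [List.foldl_cons]
      have h0i : 0 ≤ i := le_trans hk hki
      have hiN : i.toNat < arr.length := by omega
      have haK : (i - k).toNat + k.toNat = i.toNat := by omega
      have haN : (i - k).toNat < arr.length := by omega
      have hx : PySem.List.pyGetD arr i "" = arr[i.toNat]'hiN :=
        PySem.List.pyGetD_eq_getElem arr "" h0i (by omega)
      have hold : PySem.List.pyGetD arr (i - k) "" = arr[(i - k).toNat]'haN :=
        PySem.List.pyGetD_eq_getElem arr "" (by omega) (by omega)
      have hslice : PySem.List.slice arr (some (i - k)) (some i)
          = (arr.drop (i - k).toNat).take k.toNat := by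
        rw [PySem.List.slice_toNat arr (by omega) h0i]
        congr 1
        omega
      have hcond : (0 < d.getD (arr[i.toNat]'hiN) 0)
          ↔ arr[i.toNat]'hiN ∈ (arr.drop (i - k).toNat).take k.toNat := by
        rw [hinv]
        rw [show ((0:Int) < (List.count (arr[i.toNat]'hiN) ((arr.drop (i - k).toNat).take k.toNat) : Int)) ↔ 0 < List.count (arr[i.toNat]'hiN) ((arr.drop (i - k).toNat).take k.toNat) from by exact_mod_cast Iff.rfl]
        exact List.count_pos_iff
      have hshift := pv_count_shift arr k.toNat (i - k).toNat (by omega)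
      rw [hx, hold, hslice]
      have hstep :
          (if arr[i.toNat]'hiN ∈ (arr.drop (i - k).toNat).take k.toNat then s + 1 else s + 5)
            = s + (if 0 < d.getD (arr[i.toNat]'hiN) 0 then 1 else 5) := by
        simp only [hcond]
        split_ifs <;> ring
      rw [← hstep]
      have hinv' : ∀ y,
          ((d.insert (arr[i.toNat]'hiN) (d.getD (arr[i.toNat]'hiN) 0 + 1)).insert
              (arr[(i - k).toNat]'haN)
              ((d.insert (arr[i.toNat]'hiN) (d.getD (arr[i.toNat]'hiN) 0 + 1)).getD
                (arr[(i - k).toNat]'haN) 0 - 1)).getD y 0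
            = (((arr.drop (i + 1 - k).toNat).take k.toNat).count y : Int) := by
        intro y
        have hidx : (i + 1 - k).toNat = (i - k).toNat + 1 := by omega
        rw [hidx, hshift y]
        simp only [PySem.Dict.getD_insert, hinv]
        simp only [haK]
        by_cases hy1 : y = arr[i.toNat]'hiN
        · subst hy1
          by_cases heq : arr[i.toNat]'hiN = arr[(i - k).toNat]'haN
          · rw [heq]; simp
          · simp [heq]
        · by_cases hy2 : y = arr[(i - k).toNat]'haN
          · subst hy2
            simp [hy1]
          · simp [hy1, hy2]
      exact ih (i + 1) (by omega) (by push_cast at hlen ⊢; omega) _ _ hinv'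

-- ===== VERDICT (by name: the statement is the Claim_ definition above) =====
theorem get_cache_spec : Claim_equal_get_cache := by
  intro size array _ hpre
  have hs : 0 ≤ size := hpre
  unfold Spec_get_cache
  simp only [get_cache, get_cache_alt]
  have hinit : ∀ y,
      ((PySem.List.slice (array.map PySem.Str.upper) none (some size)).foldl
          (fun d x => d.insert x (d.getD x 0 + 1)) PySem.Dict.empty).getD y 0
        = ((((array.map PySem.Str.upper).drop (size - size).toNat).take size.toNat).count y : Int) := by
    intro y
    rw [PySem.List.slice_to _ hs, PySem.Dict.getD_foldl_insert_add_one]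
    simp
  rw [pv_loop (array.map PySem.Str.upper) size hs (array.map PySem.Str.upper).length size
      le_rfl (by omega) _ 0 hinit]
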